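-- pv_equiv track=rewrite | github.com/cid02289623/Stylus | gesture_tester.py | build_trial_sequence
-- ===== SOURCE A (Python) =====
-- def gesture_to_vector(label, amp, unknown_amp, invert_gx=False, invert_gy=False):
--     """
--     Default mapping:
--       +Gx -> RIGHT
--       -Gx -> LEFT
--       +Gy -> UP
--       -Gy -> DOWN
--
--     Use --invert-gx and/or --invert-gy if the firmware uses the opposite sign convention.
--     """
--     sx = -1 if invert_gx else 1
--     sy = -1 if invert_gy else 1
--
--     if label == "RIGHT":
--         return sx * amp, 0
--     if label == "LEFT":
--         return -sx * amp, 0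
--     if label == "UP":
--         return 0, sy * amp
--     if label == "DOWN":
--         return 0, -sy * amp
--     if label == "UNKNOWN":
--         return unknown_amp, 0
--
--     raise ValueError(f"Unknown gesture label: {label}")
--
-- def build_trial_sequence(label, amp, unknown_amp, press_frames, capture_frames,
--                          hold_frames, idle_frames, button_mask,
--                          invert_gx=False, invert_gy=False):
--     """
--     Build one synthetic gesture trial.
--
--     Sequence:
--       idle-before
--       press-settle
--       capture
--       hold-still
--       release
--       idle-after
--     """
--     gx, gy = gesture_to_vector(
--         label=label,
--         amp=amp,
--         unknown_amp=unknown_amp,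
--         invert_gx=invert_gx,
--         invert_gy=invert_gy,
--     )
--
--     seq = []
--
--     for _ in range(idle_frames):
--         seq.append(("idle-before", 0, 0, 0, 0))
--
--     for _ in range(press_frames):
--         seq.append(("press-settle", 0, 0, 0, button_mask))
--
--     for _ in range(capture_frames):
--         seq.append(("capture", gx, gy, 0, button_mask))
--
--     for _ in range(hold_frames):
--         seq.append(("hold-still", 0, 0, 0, button_mask))
--
--     seq.append(("release", 0, 0, 0, 0))
--
--     for _ in range(idle_frames):
--         seq.append(("idle-after", 0, 0, 0, 0))
--
--     return seq
-- ===== SOURCE B (Python) =====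
-- def gesture_to_vector(label, amp, unknown_amp, invert_gx=False, invert_gy=False):
--     sx = -1 if invert_gx else 1
--     sy = -1 if invert_gy else 1
--
--     if label == "RIGHT":
--         return sx * amp, 0
--     if label == "LEFT":
--         return -sx * amp, 0
--     if label == "UP":
--         return 0, sy * amp
--     if label == "DOWN":
--         return 0, -sy * amp
--     if label == "UNKNOWN":
--         return unknown_amp, 0
--
--     raise ValueError(f"Unknown gesture label: {label}")
--
--
-- def build_trial_sequence(label, amp, unknown_amp, press_frames, capture_frames,
--                          hold_frames, idle_frames, button_mask,
--                          invert_gx=False, invert_gy=False):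
--     gx, gy = gesture_to_vector(label, amp, unknown_amp, invert_gx, invert_gy)
--     # phase boundaries as prefix sums of the (clamped) phase lengths
--     b1 = max(idle_frames, 0)
--     b2 = b1 + max(press_frames, 0)
--     b3 = b2 + max(capture_frames, 0)
--     b4 = b3 + max(hold_frames, 0)
--     b5 = b4 + 1
--     total = b5 + max(idle_frames, 0)
--
--     def frame_at(i):
--         if i < b1:
--             return ("idle-before", 0, 0, 0, 0)
--         if i < b2:
--             return ("press-settle", 0, 0, 0, button_mask)
--         if i < b3:
--             return ("capture", gx, gy, 0, button_mask)
--         if i < b4: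
--             return ("hold-still", 0, 0, 0, button_mask)
--         if i < b5:
--             return ("release", 0, 0, 0, 0)
--         return ("idle-after", 0, 0, 0, 0)
--
--     return [frame_at(i) for i in range(total)]
-- ===== Notes on version B (the rewrite author's own statement) =====
-- stated objective: alternative
-- what changed: B computes the phase boundaries as prefix sums once and generates the sequence in one comprehension over the frame index, selecting each frame by comparing its index to the boundaries, instead of A's six sequential append loops.
import Mathlib
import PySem

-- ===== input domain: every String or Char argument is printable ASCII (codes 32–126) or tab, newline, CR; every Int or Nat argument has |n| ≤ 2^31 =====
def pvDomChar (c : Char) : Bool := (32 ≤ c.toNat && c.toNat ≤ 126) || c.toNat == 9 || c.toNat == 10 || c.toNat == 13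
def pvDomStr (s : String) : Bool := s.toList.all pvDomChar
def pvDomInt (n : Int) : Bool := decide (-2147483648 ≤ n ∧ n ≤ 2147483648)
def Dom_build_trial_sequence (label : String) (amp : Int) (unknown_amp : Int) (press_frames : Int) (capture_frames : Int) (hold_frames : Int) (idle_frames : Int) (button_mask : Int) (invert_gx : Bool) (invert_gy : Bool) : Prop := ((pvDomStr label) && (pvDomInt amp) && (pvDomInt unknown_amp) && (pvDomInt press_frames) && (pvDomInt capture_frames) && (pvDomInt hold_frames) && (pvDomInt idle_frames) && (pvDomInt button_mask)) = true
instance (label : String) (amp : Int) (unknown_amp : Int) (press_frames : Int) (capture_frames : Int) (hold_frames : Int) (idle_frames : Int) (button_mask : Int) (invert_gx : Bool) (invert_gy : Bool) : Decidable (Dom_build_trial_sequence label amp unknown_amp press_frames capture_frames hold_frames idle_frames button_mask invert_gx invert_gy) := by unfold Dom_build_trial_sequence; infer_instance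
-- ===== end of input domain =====

-- B generates the sequence by index arithmetic over precomputed phase boundaries
-- (one comprehension over range(total)) instead of A's six sequential append loops; objective: alternative.

-- ===== PORT A =====
-- shared module helper gesture_to_vector; none = the ValueError branch
def gesture_to_vector (label : String) (amp : Int) (unknown_amp : Int) (invert_gx : Bool) (invert_gy : Bool) : Option (Int × Int) :=
  let sx : Int := if invert_gx then -1 else 1
  let sy : Int := if invert_gy then -1 else 1
  if label = "RIGHT" then some (sx * amp, 0)
  else if label = "LEFT" then some (-sx * amp, 0)
  else if label = "UP" then some (0, sy * amp)
  else if label = "DOWN" then some (0, -sy * amp)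
  else if label = "UNKNOWN" then some (unknown_amp, 0)
  else none

def build_trial_sequence (label : String) (amp : Int) (unknown_amp : Int) (press_frames : Int) (capture_frames : Int) (hold_frames : Int) (idle_frames : Int) (button_mask : Int) (invert_gx : Bool) (invert_gy : Bool) : List (String × Int × Int × Int × Int) :=
  match gesture_to_vector label amp unknown_amp invert_gx invert_gy with
  | none => []  -- unreachable under Pre_: Python raises ValueError here
  | some (gx, gy) =>
    let seq : List (String × Int × Int × Int × Int) := []
    let seq := (PySem.List.pyRange 0 idle_frames 1).foldl (fun s _ => s ++ [("idle-before", 0, 0, 0, 0)]) seq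
    let seq := (PySem.List.pyRange 0 press_frames 1).foldl (fun s _ => s ++ [("press-settle", 0, 0, 0, button_mask)]) seq
    let seq := (PySem.List.pyRange 0 capture_frames 1).foldl (fun s _ => s ++ [("capture", gx, gy, 0, button_mask)]) seq
    let seq := (PySem.List.pyRange 0 hold_frames 1).foldl (fun s _ => s ++ [("hold-still", 0, 0, 0, button_mask)]) seq
    let seq := seq ++ [("release", 0, 0, 0, 0)]
    let seq := (PySem.List.pyRange 0 idle_frames 1).foldl (fun s _ => s ++ [("idle-after", 0, 0, 0, 0)]) seq
    seq

-- ===== PORT B =====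
def build_trial_sequence_alt (label : String) (amp : Int) (unknown_amp : Int) (press_frames : Int) (capture_frames : Int) (hold_frames : Int) (idle_frames : Int) (button_mask : Int) (invert_gx : Bool) (invert_gy : Bool) : List (String × Int × Int × Int × Int) :=
  match gesture_to_vector label amp unknown_amp invert_gx invert_gy with
  | none => []  -- unreachable under Pre_: Python raises ValueError here
  | some (gx, gy) =>
    let b1 := max idle_frames 0
    let b2 := b1 + max press_frames 0
    let b3 := b2 + max capture_frames 0
    let b4 := b3 + max hold_frames 0
    let b5 := b4 + 1
    let total := b5 + max idle_frames 0
    (PySem.List.pyRange 0 total 1).map (fun i =>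
      if i < b1 then ("idle-before", 0, 0, 0, 0)
      else if i < b2 then ("press-settle", 0, 0, 0, button_mask)
      else if i < b3 then ("capture", gx, gy, 0, button_mask)
      else if i < b4 then ("hold-still", 0, 0, 0, button_mask)
      else if i < b5 then ("release", 0, 0, 0, 0)
      else ("idle-after", 0, 0, 0, 0))

-- ===== PRECONDITION & SPEC =====
-- Pre_ excludes exactly the labels on which the Python A (and B) raise ValueError.
def Pre_build_trial_sequence (label : String) (amp : Int) (unknown_amp : Int) (press_frames : Int) (capture_frames : Int) (hold_frames : Int) (idle_frames : Int) (button_mask : Int) (invert_gx : Bool) (invert_gy : Bool) : Prop :=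
  label = "RIGHT" ∨ label = "LEFT" ∨ label = "UP" ∨ label = "DOWN" ∨ label = "UNKNOWN"
instance (label : String) (amp : Int) (unknown_amp : Int) (press_frames : Int) (capture_frames : Int) (hold_frames : Int) (idle_frames : Int) (button_mask : Int) (invert_gx : Bool) (invert_gy : Bool) : Decidable (Pre_build_trial_sequence label amp unknown_amp press_frames capture_frames hold_frames idle_frames button_mask invert_gx invert_gy) := by unfold Pre_build_trial_sequence; infer_instance

def pvWitness_build_trial_sequence : String × Int × Int × Int × Int × Int × Int × Int × Bool × Bool := ("RIGHT", 5, 7, 2, 3, 1, 2, 1, false, true)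

def Spec_build_trial_sequence (label : String) (amp : Int) (unknown_amp : Int) (press_frames : Int) (capture_frames : Int) (hold_frames : Int) (idle_frames : Int) (button_mask : Int) (invert_gx : Bool) (invert_gy : Bool) (out : List (String × Int × Int × Int × Int)) : Prop := out = build_trial_sequence_alt label amp unknown_amp press_frames capture_frames hold_frames idle_frames button_mask invert_gx invert_gy
instance (label : String) (amp : Int) (unknown_amp : Int) (press_frames : Int) (capture_frames : Int) (hold_frames : Int) (idle_frames : Int) (button_mask : Int) (invert_gx : Bool) (invert_gy : Bool) (out : List (String × Int × Int × Int × Int)) : Decidable (Spec_build_trial_sequence label amp unknown_amp press_frames capture_frames hold_frames idle_frames button_mask invert_gx invert_gy out) := by unfold Spec_build_trial_sequence; infer_instance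

-- ===== CLAIM =====
def Claim_equal_build_trial_sequence : Prop := ∀ (label : String) (amp : Int) (unknown_amp : Int) (press_frames : Int) (capture_frames : Int) (hold_frames : Int) (idle_frames : Int) (button_mask : Int) (invert_gx : Bool) (invert_gy : Bool), Dom_build_trial_sequence label amp unknown_amp press_frames capture_frames hold_frames idle_frames button_mask invert_gx invert_gy → Pre_build_trial_sequence label amp unknown_amp press_frames capture_frames hold_frames idle_frames button_mask invert_gx invert_gy → Spec_build_trial_sequence label amp unknown_amp press_frames capture_frames hold_frames idle_frames button_mask invert_gx invert_gy (build_trial_sequence label amp unknown_amp press_frames capture_frames hold_frames idle_frames button_mask invert_gx invert_gy)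

-- ===== LEMMAS AND PROOFS =====
-- A's append loop over any list is a replicate of its length
theorem pv_foldl_append_const {α β : Type} (l : List α) (acc : List β) (x : β) :
    l.foldl (fun s _ => s ++ [x]) acc = acc ++ List.replicate l.length x := by
  induction l generalizing acc with
  | nil => simp
  | cons a t ih =>
    rw [List.foldl_cons, ih, List.append_assoc]
    simp [List.replicate_succ]

-- mapping a function constant on [a,b) over pyRange a b 1 is a replicate
theorem pv_map_pyRange_const {β : Type} (a b : Int) (f : Int → β) (x : β)
    (h : ∀ i : Int, a ≤ i → i < b → f i = x) :
    (PySem.List.pyRange a b 1).map f = List.replicate (b - a).toNat x := by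
  have h1 : (PySem.List.pyRange a b 1).map f
      = (PySem.List.pyRange a b 1).map (fun _ => x) := by
    apply List.map_congr_left
    intro i hi
    rw [PySem.List.mem_pyRange_one] at hi
    exact h i hi.1 hi.2
  rw [h1, List.map_const', PySem.List.length_pyRange_one]

-- ===== VERDICT =====
theorem build_trial_sequence_spec : Claim_equal_build_trial_sequence := by
  intro label amp unknown_amp press_frames capture_frames hold_frames idle_frames button_mask invert_gx invert_gy _ _
  unfold Spec_build_trial_sequence build_trial_sequence build_trial_sequence_alt
  cases h : gesture_to_vector label amp unknown_amp invert_gx invert_gy with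
  | none => rfl
  | some gv =>
    obtain ⟨gx, gy⟩ := gv
    simp only
    -- abbreviations for boundaries
    set b1 := max idle_frames 0 with hb1
    set b2 := b1 + max press_frames 0 with hb2
    set b3 := b2 + max capture_frames 0 with hb3
    set b4 := b3 + max hold_frames 0 with hb4
    set b5 := b4 + 1 with hb5
    set total := b5 + max idle_frames 0 with htotal
    -- split B's range at each boundary
    rw [PySem.List.pyRange_one_append 0 b1 total (by omega) (by omega),
        PySem.List.pyRange_one_append b1 b2 total (by omega) (by omega),
        PySem.List.pyRange_one_append b2 b3 total (by omega) (by omega),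
        PySem.List.pyRange_one_append b3 b4 total (by omega) (by omega),
        PySem.List.pyRange_one_append b4 b5 total (by omega) (by omega)]
    simp only [List.map_append]
    rw [pv_map_pyRange_const 0 b1 _ ("idle-before", 0, 0, 0, 0)
          (by intro i h1 h2; rw [if_pos (by omega)]),
        pv_map_pyRange_const b1 b2 _ ("press-settle", 0, 0, 0, button_mask)
          (by intro i h1 h2; rw [if_neg (by omega), if_pos (by omega)]),
        pv_map_pyRange_const b2 b3 _ ("capture", gx, gy, 0, button_mask)
          (by intro i h1 h2; rw [if_neg (by omega), if_neg (by omega), if_pos (by omega)]),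
        pv_map_pyRange_const b3 b4 _ ("hold-still", 0, 0, 0, button_mask)
          (by intro i h1 h2; rw [if_neg (by omega), if_neg (by omega), if_neg (by omega), if_pos (by omega)]),
        pv_map_pyRange_const b4 b5 _ ("release", 0, 0, 0, 0)
          (by intro i h1 h2; rw [if_neg (by omega), if_neg (by omega), if_neg (by omega), if_neg (by omega), if_pos (by omega)]),
        pv_map_pyRange_const b5 total _ ("idle-after", 0, 0, 0, 0)
          (by intro i h1 h2; rw [if_neg (by omega), if_neg (by omega), if_neg (by omega), if_neg (by omega), if_neg (by omega)])]
    rw [pv_foldl_append_const, pv_foldl_append_const, pv_foldl_append_const,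
        pv_foldl_append_const, pv_foldl_append_const]
    simp only [PySem.List.length_pyRange_one, List.nil_append, List.append_assoc]
    have e1 : (b1 - 0).toNat = (idle_frames - 0).toNat := by omega
    have e2 : (b2 - b1).toNat = (press_frames - 0).toNat := by omega
    have e3 : (b3 - b2).toNat = (capture_frames - 0).toNat := by omega
    have e4 : (b4 - b3).toNat = (hold_frames - 0).toNat := by omega
    have e5 : (b5 - b4).toNat = 1 := by omega
    have e6 : (total - b5).toNat = (idle_frames - 0).toNat := by omega
    rw [e1, e2, e3, e4, e5, e6]
    simp
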